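-- pv_equiv track=rewrite | github.com/DrA1ex/shealth_to_gpx | samsung_json_to_gpx.py | _merge_tracks
-- ===== SOURCE A (Python) =====
-- def _merge_tracks(tracks):
--     result = {}
--     for track in tracks:
--         for row in track:
--             if not row.get('start_time'):
--                 continue
--
--             if row['start_time'] not in result:
--                 result[row['start_time']] = {}
--
--             result[row['start_time']].update(row)
--
--     return [result[key] for key in sorted(result.keys())]
-- ===== SOURCE B (Python) =====
-- def _merge_tracks(tracks):
--     rows = [row for track in tracks for row in track if row.get('start_time')]
--     keys = sorted({row['start_time'] for row in rows})
--     out = []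
--     for key in keys:
--         merged = {}
--         for row in rows:
--             if row['start_time'] == key:
--                 merged.update(row)
--         out.append(merged)
--     return out
-- ===== Notes on version B (the rewrite author's own statement) =====
-- stated objective: alternative
-- what changed: Replaces A's dict-of-dicts accumulator (incrementally updated per row, then values read off in sorted key order) by computing the sorted distinct keys first and building each merged group with its own pass over the flattened filtered rows.
import Mathlib
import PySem

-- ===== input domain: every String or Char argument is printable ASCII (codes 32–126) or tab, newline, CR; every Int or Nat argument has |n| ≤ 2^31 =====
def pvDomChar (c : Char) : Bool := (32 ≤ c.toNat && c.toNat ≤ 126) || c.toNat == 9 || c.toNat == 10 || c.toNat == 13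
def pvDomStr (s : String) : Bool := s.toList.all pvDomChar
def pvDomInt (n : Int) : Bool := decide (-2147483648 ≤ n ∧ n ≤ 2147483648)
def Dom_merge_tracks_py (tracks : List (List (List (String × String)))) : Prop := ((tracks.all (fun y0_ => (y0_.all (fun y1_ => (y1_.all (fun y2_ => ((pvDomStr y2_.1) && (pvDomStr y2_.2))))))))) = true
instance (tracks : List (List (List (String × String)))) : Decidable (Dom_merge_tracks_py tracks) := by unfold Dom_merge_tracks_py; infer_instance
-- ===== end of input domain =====

-- B computes the sorted distinct keys first and builds each merged group with its own
-- pass over the flattened filtered rows, instead of A's dict-of-dicts accumulator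
-- (objective: alternative decomposition; not faster).

-- shared helper: row.get('start_time') with None collapsed to "" (both falsy values of a str-valued dict)
def pvStart (row : List (String × String)) : String :=
  ((PySem.Dict.mk row).get? "start_time").getD ""

-- ===== PORT A =====
-- loop body of A: skip falsy start_time; 'if st not in result: result[st] = {}' followed by
-- 'result[st].update(row)' is result.insert st ((result.getD st empty).update row)
-- (insert keeps the position of an existing key, appends a new one — exactly Python's behaviour here);
-- row['start_time'] is ported as pvStart row: the key is present (guaranteed by the guard), so getD "" is exact.
def pvStepA (result : PySem.Dict String (PySem.Dict String String))
    (row : List (String × String)) : PySem.Dict String (PySem.Dict String String) :=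
  if pvStart row = "" then result
  else result.insert (pvStart row) ((result.getD (pvStart row) PySem.Dict.empty).update row)

def merge_tracks_py (tracks : List (List (List (String × String)))) : List (List (String × String)) :=
  let result := tracks.foldl (fun result track => track.foldl pvStepA result) PySem.Dict.empty
  (PySem.List.sorted result.keys (fun k => k) false).map
    (fun key => (result.getD key PySem.Dict.empty).items)

-- ===== PORT B =====
def merge_tracks_py_alt (tracks : List (List (List (String × String)))) : List (List (String × String)) :=
  let rows := tracks.flatMap (fun track => track.filter (fun row => decide (pvStart row ≠ "")))
  let keys := PySem.List.sorted (PySem.Set.ofList (rows.map pvStart)) (fun k => k) false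
  keys.map (fun key =>
    (rows.foldl (fun merged row => if pvStart row = key then merged.update row else merged)
      PySem.Dict.empty).items)

-- ===== PRECONDITION & SPEC =====
def Spec_merge_tracks_py (tracks : List (List (List (String × String)))) (out : List (List (String × String))) : Prop := out = merge_tracks_py_alt tracks
instance (tracks : List (List (List (String × String)))) (out : List (List (String × String))) : Decidable (Spec_merge_tracks_py tracks out) := by unfold Spec_merge_tracks_py; infer_instance

-- ===== CLAIM (what is proved, stated in full; the proofs are below) =====
def Claim_equal_merge_tracks_py : Prop := ∀ (tracks : List (List (List (String × String)))), Dom_merge_tracks_py tracks → Spec_merge_tracks_py tracks (merge_tracks_py tracks)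

-- ===== LEMMAS AND PROOFS =====

-- A's nested loop over tracks is the loop over the flattened rows
theorem foldl_nested_eq_flat (tracks : List (List (List (String × String))))
    (d : PySem.Dict String (PySem.Dict String String)) :
    tracks.foldl (fun r t => t.foldl pvStepA r) d
      = (tracks.flatMap (fun t => t)).foldl pvStepA d := by
  induction tracks generalizing d with
  | nil => rfl
  | cons t ts ih => simp [List.foldl_append, ih]

-- flattening after filtering = filtering the flattened list
theorem flatMap_filter (tracks : List (List (List (String × String))))
    (p : List (String × String) → Bool) :
    tracks.flatMap (fun t => t.filter p) = (tracks.flatMap (fun t => t)).filter p := by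
  induction tracks with
  | nil => rfl
  | cons t ts ih => simp [List.filter_append, ih]

-- lookup in A's accumulator: fold over the rows with key k, in order
theorem getD_foldl_stepA (rs : List (List (String × String)))
    (d : PySem.Dict String (PySem.Dict String String)) (k : String) (hk : k ≠ "") :
    (rs.foldl pvStepA d).getD k PySem.Dict.empty
      = (rs.filter (fun r => decide (pvStart r = k))).foldl
          (fun m r => m.update r) (d.getD k PySem.Dict.empty) := by
  induction rs generalizing d with
  | nil => rfl
  | cons r rs ih =>
    by_cases h0 : pvStart r = ""
    · simp [pvStepA, h0, hk, ih]
    · by_cases hk' : pvStart r = k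
      · simp [pvStepA, hk', hk, ih, PySem.Dict.getD_insert_self]
      · simp [pvStepA, h0, hk', ih,
          PySem.Dict.getD_insert_of_ne _ _ _ (fun h => hk' h.symm)]

-- keys of A's accumulator: the set-update by the filtered keys, in order
theorem keys_foldl_stepA (rs : List (List (String × String)))
    (d : PySem.Dict String (PySem.Dict String String)) :
    (rs.foldl pvStepA d).keys
      = PySem.Set.update d.keys ((rs.filter (fun r => decide (pvStart r ≠ ""))).map pvStart) := by
  induction rs generalizing d with
  | nil => rfl
  | cons r rs ih =>
    by_cases h0 : pvStart r = ""
    · simp [pvStepA, h0, ih]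
    · have hkeys : (pvStepA d r).keys = PySem.Set.add d.keys (pvStart r) := by
        unfold PySem.Set.add
        by_cases hc : d.contains (pvStart r) = true
        · have hm : pvStart r ∈ d.keys := (PySem.Dict.contains_iff_mem_keys d _).mp hc
          simp [pvStepA, h0, PySem.Dict.keys_insert_of_contains d _ hc, hm]
        · have hm : pvStart r ∉ d.keys := fun h =>
            hc ((PySem.Dict.contains_iff_mem_keys d _).mpr h)
          simp [pvStepA, h0,
            PySem.Dict.keys_insert_of_not_contains d _ (by simpa using hc), hm]
      rw [List.foldl_cons, ih, hkeys, List.filter_cons]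
      simp [h0, PySem.Set.update_cons]

-- B's conditional fold = fold over the filtered rows
theorem foldl_if_eq_filter (rs : List (List (String × String)))
    (m : PySem.Dict String String) (k : String) :
    rs.foldl (fun m r => if pvStart r = k then m.update r else m) m
      = (rs.filter (fun r => decide (pvStart r = k))).foldl (fun m r => m.update r) m := by
  induction rs generalizing m with
  | nil => rfl
  | cons r rs ih =>
    by_cases h : pvStart r = k <;> simp [h, ih]

theorem merge_tracks_eq (tracks : List (List (List (String × String)))) :
    merge_tracks_py tracks = merge_tracks_py_alt tracks := by
  simp only [merge_tracks_py, merge_tracks_py_alt]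
  rw [foldl_nested_eq_flat, flatMap_filter, keys_foldl_stepA]
  rw [show (PySem.Dict.empty : PySem.Dict String (PySem.Dict String String)).keys = [] from rfl,
    PySem.Set.update_nil_left]
  apply List.map_congr_left
  intro key hkey
  have hk : key ≠ "" := by
    rw [PySem.List.mem_sorted, PySem.Set.mem_ofList, List.mem_map] at hkey
    obtain ⟨r, hr, hrk⟩ := hkey
    rw [List.mem_filter] at hr
    simpa [hrk] using hr.2
  rw [getD_foldl_stepA _ _ _ hk, foldl_if_eq_filter, List.filter_filter]
  have hcg : ∀ r ∈ tracks.flatMap (fun t => t),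
      (decide (pvStart r = key) && decide (pvStart r ≠ "")) = decide (pvStart r = key) := by
    intro r _
    by_cases h : pvStart r = key
    · simp [h, hk]
    · simp [h]
  rw [List.filter_congr hcg]
  simp [PySem.Dict.getD_empty]

-- ===== VERDICT (by name: the statement is the Claim_ definition above) =====
theorem merge_tracks_py_spec : Claim_equal_merge_tracks_py := by
  intro tracks _
  unfold Spec_merge_tracks_py
  exact merge_tracks_eq tracks
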